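-- pv_equiv track=rewrite | github.com/ag-su/codingTest | 프로그래머스/1/160586. 대충 만든 자판/대충 만든 자판.py | solution
-- ===== SOURCE A (Python) =====
-- def solution(keymap, targets):
--     dic_cnt = {}
--
--     for key in keymap:
--         for i, k in enumerate(key):
--             if (k in dic_cnt.keys()) and (i+1 >= dic_cnt[k]):
--                  continue
--             dic_cnt[k] = i+1
--
--     answer = [0] * len(targets)
--     for i, target in enumerate(targets):
--         for t in target:
--             if t not in dic_cnt.keys():
--                 answer[i] = -1
--                 break
--             answer[i] += dic_cnt[t]
--
--     return answer
-- ===== SOURCE B (Python) =====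
-- def solution(keymap, targets):
--     cache = {}
--
--     def cost(c):
--         if c in cache:
--             return cache[c]
--         best = min((key.index(c) + 1 for key in keymap if c in key), default=None)
--         cache[c] = best
--         return best
--
--     answer = []
--     for target in targets:
--         total = 0
--         for c in target:
--             v = cost(c)
--             if v is None:
--                 total = -1
--                 break
--             total += v
--         answer.append(total)
--     return answer
-- ===== Notes on version B (the rewrite author's own statement) =====
-- stated objective: alternative
-- what changed: Drops A's precomputed enumerate/running-min dictionary: each character's cost is computed on demand as min(key.index(c)+1 over keymap strings containing c), lazily memoized per character.
import Mathlib
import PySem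

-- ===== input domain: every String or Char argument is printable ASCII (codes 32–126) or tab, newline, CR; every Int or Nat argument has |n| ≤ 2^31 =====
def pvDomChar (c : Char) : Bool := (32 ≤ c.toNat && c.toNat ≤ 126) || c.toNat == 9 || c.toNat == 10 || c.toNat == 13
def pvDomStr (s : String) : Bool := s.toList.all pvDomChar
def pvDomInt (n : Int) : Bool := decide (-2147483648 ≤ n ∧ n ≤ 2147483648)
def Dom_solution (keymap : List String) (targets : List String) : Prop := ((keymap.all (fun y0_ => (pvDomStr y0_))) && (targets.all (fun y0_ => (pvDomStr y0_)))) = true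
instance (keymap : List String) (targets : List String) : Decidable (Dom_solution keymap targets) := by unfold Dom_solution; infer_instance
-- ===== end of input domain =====

-- B replaces A's precomputed min-position dictionary by an on-demand scan of the keymap
-- for each target character (objective: simpler). Return values proved equal on all inputs.

-- ===== PORT A =====
-- the inner 'for i, k in enumerate(key)' loop body
def pvAUpd (d : PySem.Dict Char Int) (p : Int × Char) : PySem.Dict Char Int :=
  if d.contains p.2 && decide (p.1 + 1 ≥ d.getD p.2 0) then d
  else d.insert p.2 (p.1 + 1)

-- 'for key in keymap: for i, k in enumerate(key): …'
def pvBuild (keymap : List String) : PySem.Dict Char Int :=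
  keymap.foldl (fun d key => (PySem.List.enumerate key.toList 0).foldl pvAUpd d) PySem.Dict.empty

-- 'for t in target: …' with the break-to--1
def pvATarget (d : PySem.Dict Char Int) : List Char → Int → Int
  | [], acc => acc
  | t :: ts, acc =>
    match d.get? t with
    | none => -1
    | some v => pvATarget d ts (acc + v)

def solution (keymap : List String) (targets : List String) : List Int :=
  targets.map (fun target => pvATarget (pvBuild keymap) target.toList 0)

-- ===== PORT B =====
-- '[key.index(c) + 1 for key in keymap if c in key]' (the generator inside min(..., default=None))
def pvBCosts (keymap : List String) (c : Char) : List Int :=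
  keymap.filterMap (fun key =>
    if key.toList.contains c then (PySem.List.index? key.toList c).map (fun i => (i : Int) + 1)
    else none)

-- 'def cost(c): …' — lazily memoized lookup; returns the value and the updated cache
def pvBCost (keymap : List String) (cache : PySem.Dict Char (Option Int)) (c : Char) :
    Option Int × PySem.Dict Char (Option Int) :=
  match cache.get? c with
  | some v => (v, cache)
  | none =>
    let best := PySem.List.min? (pvBCosts keymap c) (fun x => x)
    (best, cache.insert c best)

-- 'for c in target: …' with the break-to--1, threading the cache
def pvBChars (keymap : List String) :
    List Char → PySem.Dict Char (Option Int) → Int → Int × PySem.Dict Char (Option Int)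
  | [], cache, acc => (acc, cache)
  | c :: cs, cache, acc =>
    let (v, cache') := pvBCost keymap cache c
    match v with
    | none => (-1, cache')
    | some m => pvBChars keymap cs cache' (acc + m)

-- 'for target in targets: …'
def pvBAll (keymap : List String) : List String → PySem.Dict Char (Option Int) → List Int
  | [], _ => []
  | t :: ts, cache =>
    let (r, cache') := pvBChars keymap t.toList cache 0
    r :: pvBAll keymap ts cache'

def solution_alt (keymap : List String) (targets : List String) : List Int :=
  pvBAll keymap targets PySem.Dict.empty

-- ===== PRECONDITION & SPEC =====
def Spec_solution (keymap : List String) (targets : List String) (out : List Int) : Prop := out = solution_alt keymap targets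
instance (keymap : List String) (targets : List String) (out : List Int) : Decidable (Spec_solution keymap targets out) := by unfold Spec_solution; infer_instance

-- ===== CLAIM (what is proved, stated in full; the proofs are below) =====
def Claim_equal_solution : Prop := ∀ (keymap : List String) (targets : List String), Dom_solution keymap targets → Spec_solution keymap targets (solution keymap targets)

-- ===== LEMMAS AND PROOFS =====

-- optional minimum (none = absent), the combining operation of both programs
def pvOmin : Option Int → Option Int → Option Int
  | none, b => b
  | some a, none => some a
  | some a, some b => some (min a b)

theorem pvOmin_none_right (a : Option Int) : pvOmin a none = a := by cases a <;> rfl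

theorem pvOmin_assoc (a b c : Option Int) : pvOmin (pvOmin a b) c = pvOmin a (pvOmin b c) := by
  cases a <;> cases b <;> cases c <;> simp [pvOmin, min_assoc]

theorem pvOmin_absorb (x : Option Int) (a b : Int) (h : a ≤ b) :
    pvOmin (pvOmin x (some a)) (some b) = pvOmin x (some a) := by
  cases x <;> simp [pvOmin] <;> omega

theorem pvFoldlMin (t : List Int) (x y : Int) :
    t.foldl min (min x y) = min x (t.foldl min y) := by
  induction t generalizing y with
  | nil => rfl
  | cons z t ih => simp only [List.foldl_cons, min_assoc, ih]

theorem pvMin?_cons (x : Int) (t : List Int) :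
    PySem.List.min? (x :: t) (fun y => y) = pvOmin (some x) (PySem.List.min? t (fun y => y)) := by
  cases t with
  | nil => simp [PySem.List.min?, pvOmin]
  | cons y t' =>
    rw [PySem.List.min?_id_cons, PySem.List.min?_id_cons]
    simp only [List.foldl_cons, pvOmin, pvFoldlMin]

-- the inner enumerate-loop of A stores min(old value, s + first index + 1)
theorem pvInner (cs : List Char) (s : Int) (d : PySem.Dict Char Int) (c : Char) :
    ((PySem.List.enumerate cs s).foldl pvAUpd d).get? c =
      pvOmin (d.get? c) (Option.map (fun i : Nat => s + (i : Int) + 1) (PySem.List.index? cs c)) := by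
  induction cs generalizing s d with
  | nil => simp [PySem.List.enumerate_nil, PySem.List.index?, pvOmin_none_right]
  | cons x t ih =>
    rw [PySem.List.enumerate_cons, List.foldl_cons, ih]
    by_cases hx : x = c
    · subst hx
      rw [PySem.List.index?_cons_self]
      have hupd : (pvAUpd d (s, x)).get? x = pvOmin (d.get? x) (some (s + 1)) := by
        unfold pvAUpd
        cases hdx : d.get? x with
        | none =>
          have hc : d.contains x = false := by
            rw [PySem.Dict.contains_eq_isSome_get?, hdx]; rfl
          simp [hc, pvOmin, PySem.Dict.get?_insert_self]
        | some v =>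
          have hc : d.contains x = true := by
            rw [PySem.Dict.contains_eq_isSome_get?, hdx]; rfl
          have hgd : d.getD x 0 = v := PySem.Dict.getD_of_get?_eq_some d 0 hdx
          simp only [hc, hgd, Bool.true_and, pvOmin]
          by_cases hge : s + 1 ≥ v
          · simp [hge, hdx]
          · have hmin : min v (s + 1) = s + 1 := min_eq_right (le_of_lt (lt_of_not_ge hge))
            simp [hge, PySem.Dict.get?_insert_self, hmin]
      rw [hupd]
      cases hti : PySem.List.index? t x with
      | none =>
        simp only [Option.map_none, Option.map_some, pvOmin_none_right]
        norm_num
      | some j =>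
        simp only [Option.map_some]
        have hcast : s + ((0 : Nat) : Int) + 1 = s + 1 := by norm_num
        rw [hcast]
        exact pvOmin_absorb _ _ _ (by have := Int.natCast_nonneg j; omega)
    · have hne : c ≠ x := fun h => hx h.symm
      have hxc : x ≠ c := hx
      rw [PySem.List.index?_cons_of_ne t hxc]
      have hupd : (pvAUpd d (s, x)).get? c = d.get? c := by
        unfold pvAUpd
        split
        · rfl
        · exact PySem.Dict.get?_insert_of_ne _ _ hne
      rw [hupd]
      cases hti : PySem.List.index? t c with
      | none => simp
      | some j =>
        simp only [Option.map_some]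
        have hc : s + 1 + ((j : Nat) : Int) + 1 = s + (((j + 1 : Nat)) : Int) + 1 := by push_cast; ring
        rw [hc]

-- the dictionary A builds answers exactly B's on-demand minimum
theorem pvBuild_get? (keymap : List String) (d : PySem.Dict Char Int) (c : Char) :
    (keymap.foldl (fun d key => (PySem.List.enumerate key.toList 0).foldl pvAUpd d) d).get? c =
      pvOmin (d.get? c) (PySem.List.min? (pvBCosts keymap c) (fun x => x)) := by
  induction keymap generalizing d with
  | nil =>
    have h : PySem.List.min? (pvBCosts [] c) (fun x => x) = none := by
      simp [pvBCosts, PySem.List.min?]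
    rw [List.foldl_nil, h, pvOmin_none_right]
  | cons key rest ih =>
    rw [List.foldl_cons, ih]
    have hinner := pvInner key.toList 0 d c
    by_cases hmem : c ∈ key.toList
    · have hsome : ∃ i, PySem.List.index? key.toList c = some i :=
        Option.isSome_iff_exists.mp ((PySem.List.index?_isSome_iff _ _).mpr hmem)
      rcases hsome with ⟨i, hi⟩
      have hi' : List.idxOf? c key.toList = some i := by
        rw [← PySem.List.index?_eq_idxOf?]; exact hi
      have hcosts : pvBCosts (key :: rest) c = ((i : Int) + 1) :: pvBCosts rest c := by
        simp [pvBCosts, hmem, hi']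
      rw [hcosts, pvMin?_cons, hinner, hi]
      simp only [Option.map_some, zero_add]
      rw [pvOmin_assoc]
    · have hnone : PySem.List.index? key.toList c = none :=
        (PySem.List.index?_eq_none_iff _ _).mpr hmem
      have hcosts : pvBCosts (key :: rest) c = pvBCosts rest c := by
        simp [pvBCosts, hmem]
      rw [hcosts, hinner, hnone]
      simp only [Option.map_none, pvOmin_none_right]

theorem pvGetEq (keymap : List String) (c : Char) :
    (pvBuild keymap).get? c = PySem.List.min? (pvBCosts keymap c) (fun x => x) := by
  rw [pvBuild, pvBuild_get?, PySem.Dict.get?_empty]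
  rfl

-- cache invariant: every memoized entry is the on-demand minimum
def pvCacheOk (keymap : List String) (cache : PySem.Dict Char (Option Int)) : Prop :=
  ∀ x v, cache.get? x = some v → v = PySem.List.min? (pvBCosts keymap x) (fun y => y)

theorem pvBCost_eq (keymap : List String) (cache : PySem.Dict Char (Option Int)) (c : Char)
    (h : pvCacheOk keymap cache) :
    (pvBCost keymap cache c).1 = PySem.List.min? (pvBCosts keymap c) (fun y => y) ∧
      pvCacheOk keymap (pvBCost keymap cache c).2 := by
  unfold pvBCost
  cases hc : cache.get? c with
  | some v => exact ⟨h c v hc, fun x w hw => h x w hw⟩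
  | none =>
    refine ⟨rfl, fun x w hw => ?_⟩
    rw [PySem.Dict.get?_insert] at hw
    by_cases hx : x = c
    · subst hx; simp at hw; exact hw.symm
    · rw [if_neg hx] at hw; exact h x w hw

theorem pvCharsEq (keymap : List String) (cs : List Char)
    (cache : PySem.Dict Char (Option Int)) (acc : Int) (h : pvCacheOk keymap cache) :
    (pvBChars keymap cs cache acc).1 = pvATarget (pvBuild keymap) cs acc ∧
      pvCacheOk keymap (pvBChars keymap cs cache acc).2 := by
  induction cs generalizing cache acc with
  | nil => exact ⟨rfl, h⟩
  | cons c cs ih =>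
    obtain ⟨hval, hok⟩ := pvBCost_eq keymap cache c h
    rcases hpc : pvBCost keymap cache c with ⟨v, cache'⟩
    rw [hpc] at hval hok
    simp only at hval hok
    rw [pvBChars, hpc, pvATarget, pvGetEq, ← hval]
    cases v with
    | none => exact ⟨rfl, hok⟩
    | some m => exact ih cache' (acc + m) hok

theorem pvAllEq (keymap : List String) (ts : List String)
    (cache : PySem.Dict Char (Option Int)) (h : pvCacheOk keymap cache) :
    pvBAll keymap ts cache = ts.map (fun t => pvATarget (pvBuild keymap) t.toList 0) := by
  induction ts generalizing cache with
  | nil => rfl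
  | cons t ts ih =>
    obtain ⟨hval, hok⟩ := pvCharsEq keymap t.toList cache 0 h
    rcases hpc : pvBChars keymap t.toList cache 0 with ⟨r, cache'⟩
    rw [hpc] at hval hok
    simp only at hval hok
    rw [pvBAll, hpc, List.map_cons, hval]
    exact congrArg _ (ih _ hok)

-- ===== VERDICT (by name: the statement is the Claim_ definition above) =====
theorem solution_spec : Claim_equal_solution := by
  intro keymap targets _
  unfold Spec_solution solution solution_alt
  exact (pvAllEq keymap targets PySem.Dict.empty (fun x v hv => by
    rw [PySem.Dict.get?_empty] at hv; cases hv)).symm
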